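-- pv_equiv track=rewrite | github.com/Octawel/Python2023 | Lab3/ex4.py | creeaza_melodie
-- ===== SOURCE A (Python) =====
-- def creeaza_melodie(note, miscari, start):
--     melodie = []
--     pozitie = start
--
--     for miscare in miscari:
--         if 0 <= pozitie < len(note):
--             melodie.append(note[pozitie])
--         else:
--             melodie.append('X')  # Notele inexistente sau invalide sunt notate cu 'X'
--
--         pozitie += miscare
--
--         while pozitie < 0:
--             pozitie += len(note)
--         while pozitie >= len(note):
--             pozitie -= len(note)
--
--     return melodie
-- ===== SOURCE B (Python) =====
-- def creeaza_melodie(note, miscari, start):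
--     # Key observation: after the first move the wrapped position always lies
--     # in [0, len(note)), so only the FIRST emitted note can be 'X'.  B therefore
--     # special-cases the head, computes the UNWRAPPED prefix sums of the moves,
--     # and reduces modulo len(note) only at lookup time.
--     if not miscari:
--         return []
--     n = len(note)
--     first = note[start] if 0 <= start < n else 'X'
--     sums = []
--     s = start
--     for m in miscari[:-1]:
--         s += m
--         sums.append(s)
--     return [first] + [note[s % n] for s in sums]
-- ===== Notes on version B (the rewrite author's own statement) =====
-- stated objective: alternative
-- what changed: B exploits the invariant that after the first move the wrapped position is always in range: it special-cases the head note, builds the unwrapped prefix sums of the moves (no per-step wrapping, no per-element range test), and applies modulo len(note) only at lookup; A instead maintains a wrapped position via two while-loops and range-tests every element.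
import Mathlib
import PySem

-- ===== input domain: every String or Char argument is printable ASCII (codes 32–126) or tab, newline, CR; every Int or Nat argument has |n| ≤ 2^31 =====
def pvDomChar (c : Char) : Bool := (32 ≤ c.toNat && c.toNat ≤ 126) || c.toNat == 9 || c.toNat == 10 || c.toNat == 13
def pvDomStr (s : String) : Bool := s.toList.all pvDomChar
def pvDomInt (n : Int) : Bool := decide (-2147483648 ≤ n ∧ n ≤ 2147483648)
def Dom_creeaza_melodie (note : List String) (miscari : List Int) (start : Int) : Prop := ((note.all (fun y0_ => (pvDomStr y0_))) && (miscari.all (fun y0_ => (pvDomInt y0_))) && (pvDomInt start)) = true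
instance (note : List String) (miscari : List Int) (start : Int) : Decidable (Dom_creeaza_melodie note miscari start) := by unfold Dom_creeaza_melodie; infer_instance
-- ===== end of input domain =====

-- B special-cases the first note (the only one that can be 'X'), then builds unwrapped
-- prefix sums of the moves and applies modulo only at lookup, instead of A's
-- interleaved wrapped-position loop; equal on Pre_ (note nonempty, or no moves).


-- ===== PORT A =====
-- while pozitie < 0: pozitie += len(note)   (the n = 0 guard only makes the loop total;
-- Pre_ excludes that case, where Python A loops forever)
def pvWrapNeg (p : Int) (n : Nat) : Int :=
  if _h : n = 0 then p
  else if p < 0 then pvWrapNeg (p + n) n else p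
termination_by (-p).toNat
decreasing_by omega

-- while pozitie >= len(note): pozitie -= len(note)
def pvWrapPos (p : Int) (n : Nat) : Int :=
  if _h : n = 0 then p
  else if p ≥ (n : Int) then pvWrapPos (p - n) n else p
termination_by p.toNat
decreasing_by omega

def pvStepA (note : List String) (st : List String × Int) (miscare : Int) : List String × Int :=
  let melodie := st.1
  let pozitie := st.2
  let melodie :=
    if 0 ≤ pozitie ∧ pozitie < (note.length : Int) then melodie ++ [note.getD pozitie.toNat ""]
    else melodie ++ ["X"]
  let pozitie := pozitie + miscare
  let pozitie := pvWrapNeg pozitie note.length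
  let pozitie := pvWrapPos pozitie note.length
  (melodie, pozitie)

def creeaza_melodie (note : List String) (miscari : List Int) (start : Int) : List String :=
  (miscari.foldl (pvStepA note) ([], start)).1

-- ===== PORT B =====
-- for m in miscari[:-1]: s += m; sums.append(s)
def pvSumStep (st : List Int × Int) (m : Int) : List Int × Int :=
  (st.1 ++ [st.2 + m], st.2 + m)

def creeaza_melodie_alt (note : List String) (miscari : List Int) (start : Int) : List String :=
  match miscari with
  | [] => []
  | _ :: _ =>
    let n := note.length
    let first := if 0 ≤ start ∧ start < (n : Int) then note.getD start.toNat "" else "X"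
    let sums := ((miscari.dropLast).foldl pvSumStep ([], start)).1
    [first] ++ sums.map (fun s => note.getD ((PySem.Int.mod s (n : Int)).toNat) "")

-- ===== PRECONDITION & SPEC =====
-- A loops forever (and B's `% 0` raises) when note is empty and there is at least one move,
-- so Pre_ excludes exactly the inputs on which A does not return.
def Pre_creeaza_melodie (note : List String) (miscari : List Int) (start : Int) : Prop :=
  note ≠ [] ∨ miscari = []
instance (note : List String) (miscari : List Int) (start : Int) : Decidable (Pre_creeaza_melodie note miscari start) := by unfold Pre_creeaza_melodie; infer_instance

def pvWitness_creeaza_melodie : List String × List Int × Int := (["do", "re", "mi"], [2, -4, 1], 1)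

def Spec_creeaza_melodie (note : List String) (miscari : List Int) (start : Int) (out : List String) : Prop := out = creeaza_melodie_alt note miscari start
instance (note : List String) (miscari : List Int) (start : Int) (out : List String) : Decidable (Spec_creeaza_melodie note miscari start out) := by unfold Spec_creeaza_melodie; infer_instance

-- ===== CLAIM (what is proved, stated in full; the proofs are below) =====
def Claim_equal_creeaza_melodie : Prop := ∀ (note : List String) (miscari : List Int) (start : Int), Dom_creeaza_melodie note miscari start → Pre_creeaza_melodie note miscari start → Spec_creeaza_melodie note miscari start (creeaza_melodie note miscari start)

-- ===== LEMMAS AND PROOFS =====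

theorem pvWrapNeg_spec (n : Nat) (hn : 0 < n) (p : Int) :
    0 ≤ pvWrapNeg p n ∧ pvWrapNeg p n % (n : Int) = p % (n : Int) := by
  fun_induction pvWrapNeg p n with
  | case1 p h => omega
  | case2 p h hp ih =>
    refine ⟨ih.1, ?_⟩
    rw [ih.2, Int.add_emod_right]
  | case3 p h hp => exact ⟨by omega, rfl⟩

theorem pvWrapPos_spec (n : Nat) (hn : 0 < n) (p : Int) (hp : 0 ≤ p) :
    0 ≤ pvWrapPos p n ∧ pvWrapPos p n < (n : Int) ∧
      pvWrapPos p n % (n : Int) = p % (n : Int) := by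
  fun_induction pvWrapPos p n with
  | case1 p h => omega
  | case2 p h hge ih =>
    obtain ⟨h1, h2, h3⟩ := ih (by omega)
    exact ⟨h1, h2, by rw [h3, Int.sub_emod_right]⟩
  | case3 p h hge => exact ⟨hp, by omega, rfl⟩

theorem pvWrap_eq_mod (n : Nat) (hn : 0 < n) (p : Int) :
    pvWrapPos (pvWrapNeg p n) n = PySem.Int.mod p (n : Int) := by
  obtain ⟨h1, h2⟩ := pvWrapNeg_spec n hn p
  obtain ⟨g1, g2, g3⟩ := pvWrapPos_spec n hn _ h1
  rw [PySem.Int.mod_eq_emod_of_pos (by exact_mod_cast hn : (0:Int) < (n:Int))]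
  have : pvWrapPos (pvWrapNeg p n) n % (n : Int) = p % (n : Int) := by rw [g3, h2]
  rw [← this, Int.emod_eq_of_lt g1 g2]

-- the raw (unwrapped) running sums: the position BEFORE each move of the list
def pvPos (s : Int) : List Int → List Int
  | [] => []
  | m :: rest => s :: pvPos (s + m) rest

-- A's fold, started at an already-wrapped position s mod n, is the modular lookup image
-- of the unwrapped sums pvPos s L.
theorem pvFoldA_char (note : List String) (hn : 0 < note.length) :
    ∀ (L : List Int) (acc : List String) (s : Int),
      (L.foldl (pvStepA note) (acc, PySem.Int.mod s (note.length : Int))).1 =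
        acc ++ (pvPos s L).map
          (fun t => note.getD ((PySem.Int.mod t (note.length : Int)).toNat) "") := by
  intro L
  induction L with
  | nil => intro acc s; simp [pvPos]
  | cons m rest ih =>
    intro acc s
    have hpos : (0:Int) < (note.length : Int) := by exact_mod_cast hn
    have hm0 : 0 ≤ PySem.Int.mod s (note.length : Int) :=
      PySem.Int.mod_nonneg _ hpos
    have hm1 : PySem.Int.mod s (note.length : Int) < (note.length : Int) :=
      PySem.Int.mod_lt _ hpos
    have hstep : pvStepA note (acc, PySem.Int.mod s (note.length : Int)) m =
        (acc ++ [note.getD ((PySem.Int.mod s (note.length : Int)).toNat) ""],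
          PySem.Int.mod (s + m) (note.length : Int)) := by
      simp only [pvStepA, pvWrap_eq_mod note.length hn]
      rw [if_pos ⟨hm0, hm1⟩]
      have : PySem.Int.mod (PySem.Int.mod s (note.length : Int) + m) (note.length : Int) =
          PySem.Int.mod (s + m) (note.length : Int) := by
        simp only [PySem.Int.mod_eq_emod_of_pos hpos]
        exact Int.emod_add_emod ..
      rw [this]
    simp only [List.foldl_cons, hstep, ih]
    simp [pvPos]

-- B's running sums (what the python loop appends): s+m1, s+m1+m2, ...
def pvSums (s : Int) : List Int → List Int
  | [] => []
  | m :: rest => (s + m) :: pvSums (s + m) rest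

theorem pvFoldB_char : ∀ (L : List Int) (acc : List Int) (s : Int),
    (L.foldl pvSumStep (acc, s)).1 = acc ++ pvSums s L := by
  intro L
  induction L with
  | nil => intro acc s; simp [pvSums]
  | cons m rest ih =>
    intro acc s
    simp only [List.foldl_cons, pvSumStep, ih, pvSums]
    simp

theorem pvSums_dropLast : ∀ (rest : List Int) (s m : Int),
    pvSums s ((m :: rest).dropLast) = pvPos (s + m) rest := by
  intro rest
  induction rest with
  | nil => intro s m; simp [pvSums, pvPos]
  | cons r rs ih =>
    intro s m
    rw [List.dropLast_cons₂]
    simp only [pvSums, pvPos, ih]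

-- ===== VERDICT (by name: the statement is the Claim_ definition above) =====
theorem creeaza_melodie_spec : Claim_equal_creeaza_melodie := by
  intro note miscari start _ hpre
  unfold Spec_creeaza_melodie
  cases miscari with
  | nil => simp [creeaza_melodie, creeaza_melodie_alt]
  | cons m rest =>
    have hn : 0 < note.length := by
      rcases hpre with h | h
      · exact List.length_pos_iff.mpr h
      · simp at h
    have hpos : (0:Int) < (note.length : Int) := by exact_mod_cast hn
    unfold creeaza_melodie creeaza_melodie_alt
    simp only [List.foldl_cons]
    have hstep : pvStepA note ([], start) m =
        ((if 0 ≤ start ∧ start < (note.length : Int)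
            then [note.getD start.toNat ""] else ["X"]),
          PySem.Int.mod (start + m) (note.length : Int)) := by
      simp only [pvStepA, pvWrap_eq_mod note.length hn]
      split_ifs <;> simp
    rw [hstep, pvFoldA_char note hn rest _ (start + m), pvFoldB_char, pvSums_dropLast]
    split_ifs <;> simp
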